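-- pv_equiv track=rewrite | github.com/namngth04/Team-Fireflight---Chatbot | app/services/spoon_graph_service.py | _build_citation_section
-- ===== SOURCE A (Python) =====
-- from typing import Any, Dict, List, Optional, Tuple
--
-- def _build_citation_section(evidence: List[Dict[str, Any]], limit: int = 2) -> str:
--     lines: List[str] = []
--     seen_files: set[str] = set()
--     for idx, item in enumerate(evidence[:limit * 2], start=1):  # Check more items to find unique files
--         meta = item.get("metadata") or {}
--         filename = meta.get("filename") or meta.get("source") or f"Tài liệu {idx}"
--         section = meta.get("section") or meta.get("heading") or ""
--
--         # Skip if we've already seen this filename (avoid duplicates)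
--         if filename in seen_files:
--             continue
--         seen_files.add(filename)
--
--         if section:
--             lines.append(f"- {filename} › {section}")
--         else:
--             lines.append(f"- {filename}")
--
--         # Stop when we have enough unique citations
--         if len(lines) >= limit:
--             break
--
--     if not lines:
--         return ""
--     return "\n\nNguồn:\n" + "\n".join(lines)
-- ===== SOURCE B (Python) =====
-- def _entry(idx, item):
--     meta = item.get("metadata") or {}
--     filename = meta.get("filename") or meta.get("source") or f"Tài liệu {idx}"
--     section = meta.get("section") or meta.get("heading") or ""
--     return filename, f"- {filename} › {section}" if section else f"- {filename}"
--
-- def _build_citation_section(evidence, limit=2):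
--     entries = [_entry(i, it) for i, it in enumerate(evidence[:limit * 2], start=1)]
--     names = [f for f, _ in entries]
--     lines = [line for i, (f, line) in enumerate(entries) if names.index(f) == i][:limit]
--     return "\n\nNguồn:\n" + "\n".join(lines) if lines else ""
-- ===== Notes on version B (the rewrite author's own statement) =====
-- stated objective: alternative
-- what changed: Replaces A's single stateful loop (mutable seen-set, growing lines list, early break) by a stateless three-stage comprehension pipeline: materialise all (filename, line) entries of the slice, then select first occurrences by the positional test names.index(f) == i (no seen-state at all), then truncate to limit.
-- outside the precondition, e.g. on _build_citation_section([{}, {}, {}], -1): A returns '\n\nNguồn:\n- Tài liệu 1', B returns ''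
import Mathlib
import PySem

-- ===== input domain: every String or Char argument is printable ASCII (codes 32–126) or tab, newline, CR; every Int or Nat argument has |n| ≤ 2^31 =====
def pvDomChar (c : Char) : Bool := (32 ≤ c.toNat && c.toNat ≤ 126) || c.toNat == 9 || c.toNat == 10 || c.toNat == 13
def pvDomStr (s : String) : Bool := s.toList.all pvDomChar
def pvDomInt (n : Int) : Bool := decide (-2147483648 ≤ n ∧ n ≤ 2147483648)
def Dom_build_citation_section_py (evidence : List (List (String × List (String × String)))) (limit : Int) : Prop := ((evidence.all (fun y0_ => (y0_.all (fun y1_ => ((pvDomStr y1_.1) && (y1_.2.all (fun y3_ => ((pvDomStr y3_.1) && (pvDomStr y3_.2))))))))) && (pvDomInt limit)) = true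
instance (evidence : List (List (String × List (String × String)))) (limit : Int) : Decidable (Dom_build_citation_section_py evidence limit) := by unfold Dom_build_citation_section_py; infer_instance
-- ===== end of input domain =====

-- B replaces A's stateful loop (seen-set, growing list, early break) by a stateless pipeline:
-- all entries of the slice, first occurrences selected by the positional test names.index(f) == i,
-- then truncated to `limit`; same results on Pre_.

-- Python `x or y` where x is an Optional[str] (None and "" are falsy); both sources contain it verbatim.
def strOrElse (o : Option String) (d : String) : String :=
  match o with
  | some s => if s = "" then d else s
  | none => d

-- the per-item block both sources contain verbatim (B's helper `_entry`): meta = item.get("metadata") or {};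
-- filename = meta.get("filename") or meta.get("source") or f"Tài liệu {idx}";
-- section = meta.get("section") or meta.get("heading") or ""; the formatted line.
-- Returns (filename, formatted line).
def entryOf (idx : Int) (item : List (String × List (String × String))) : String × String :=
  let md : List (String × String) :=
    match PySem.Dict.get? (PySem.Dict.mk item) "metadata" with
    | some m => if m = [] then [] else m
    | none => []
  let filename := strOrElse (PySem.Dict.get? (PySem.Dict.mk md) "filename")
      (strOrElse (PySem.Dict.get? (PySem.Dict.mk md) "source") ("Tài liệu " ++ PySem.Int.toStr idx))
  let sec := strOrElse (PySem.Dict.get? (PySem.Dict.mk md) "section")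
      (strOrElse (PySem.Dict.get? (PySem.Dict.mk md) "heading") "")
  (filename, if sec ≠ "" then "- " ++ filename ++ " › " ++ sec else "- " ++ filename)

-- ===== PORT A =====
-- A's for-loop: skip on seen filename, append the line, break once len(lines) >= limit.
def citeLoopA (items : List (List (String × List (String × String)))) (idx : Int) (limit : Int)
    (lines : List String) (seen : PySem.Set String) : List String :=
  match items with
  | [] => lines
  | item :: rest =>
    if PySem.Set.contains seen (entryOf idx item).1 then
      citeLoopA rest (idx + 1) limit lines seen
    else
      if limit ≤ PySem.List.len (lines ++ [(entryOf idx item).2]) then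
        lines ++ [(entryOf idx item).2]
      else
        citeLoopA rest (idx + 1) limit (lines ++ [(entryOf idx item).2])
          (PySem.Set.add seen (entryOf idx item).1)

def build_citation_section_py (evidence : List (List (String × List (String × String)))) (limit : Int) : String :=
  let lines := citeLoopA (PySem.List.slice evidence none (some (limit * 2))) 1 limit [] PySem.Set.empty
  if lines = [] then "" else "\n\nNguồn:\n" ++ PySem.Str.join "\n" lines

-- ===== PORT B =====
-- Source B: entries = [_entry(i, it) for i, it in enumerate(evidence[:limit*2], 1)];
-- names = [f for f,_ in entries];
-- lines = [line for i,(f,line) in enumerate(entries) if names.index(f) == i][:limit]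
def build_citation_section_py_alt (evidence : List (List (String × List (String × String)))) (limit : Int) : String :=
  let entries := (PySem.List.enumerate (PySem.List.slice evidence none (some (limit * 2))) 1).map
      (fun p => entryOf p.1 p.2)
  let names := entries.map (fun e => e.1)
  let lines := ((PySem.List.enumerate entries 0).filter
      (fun p => (PySem.List.index? names p.2.1).map (Int.ofNat) == some p.1)).map (fun p => p.2.2)
  let lines := PySem.List.slice lines none (some limit)
  if lines = [] then "" else "\n\nNguồn:\n" ++ PySem.Str.join "\n" lines

-- ===== PRECONDITION & SPEC =====
-- Pre_ excludes negative limit when the slice evidence[:2*limit] is nonempty (A still returns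
-- there): on those inputs the behaviour is an accident on both sides — A's post-append
-- `len(lines) >= limit` break makes it emit exactly one citation, while B's `[:limit]` truncation
-- drops lines from the end — and no caller would specify either. A negative limit whose slice is
-- empty is kept inside the claim (both programs return "").
def Pre_build_citation_section_py (evidence : List (List (String × List (String × String)))) (limit : Int) : Prop :=
  0 ≤ limit ∨ (evidence.length : Int) ≤ -(2 * limit)
instance (evidence : List (List (String × List (String × String)))) (limit : Int) : Decidable (Pre_build_citation_section_py evidence limit) := by unfold Pre_build_citation_section_py; infer_instance

def pvWitness_build_citation_section_py : (List (List (String × List (String × String)))) × Int :=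
  ([[("metadata", [("filename", "a.txt"), ("section", "Intro")])],
    [("metadata", [("source", "b.txt")])]], 2)

def Spec_build_citation_section_py (evidence : List (List (String × List (String × String)))) (limit : Int) (out : String) : Prop := out = build_citation_section_py_alt evidence limit
instance (evidence : List (List (String × List (String × String)))) (limit : Int) (out : String) : Decidable (Spec_build_citation_section_py evidence limit out) := by unfold Spec_build_citation_section_py; infer_instance

-- ===== CLAIM (what is proved, stated in full; the proofs are below) =====
def Claim_equal_build_citation_section_py : Prop := ∀ (evidence : List (List (String × List (String × String)))) (limit : Int), Dom_build_citation_section_py evidence limit → Pre_build_citation_section_py evidence limit → Spec_build_citation_section_py evidence limit (build_citation_section_py evidence limit)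

-- ===== LEMMAS AND PROOFS =====

-- Reference: the deduplicated (filename, line) pairs of `items`, first occurrences only,
-- against an already-seen set, ignoring any limit.
def uniqPairs (items : List (List (String × List (String × String)))) (idx : Int)
    (seen : PySem.Set String) : List (String × String) :=
  match items with
  | [] => []
  | item :: rest =>
    if PySem.Set.contains seen (entryOf idx item).1 then uniqPairs rest (idx + 1) seen
    else (entryOf idx item) :: uniqPairs rest (idx + 1) (PySem.Set.add seen (entryOf idx item).1)

-- the same dedup, directly over a list of (filename, line) entries
def dedupP (es : List (String × String)) (seen : PySem.Set String) : List (String × String) :=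
  match es with
  | [] => []
  | e :: r =>
    if PySem.Set.contains seen e.1 then dedupP r seen
    else e :: dedupP r (PySem.Set.add seen e.1)

-- A's loop is: already-collected lines ++ the next (limit - collected) fresh unique lines.
theorem citeLoopA_eq (items : List (List (String × List (String × String)))) :
    ∀ (idx limit : Int) (lines : List String) (seen : PySem.Set String),
    (lines.length : Int) < limit →
    citeLoopA items idx limit lines seen
      = lines ++ ((uniqPairs items idx seen).map Prod.snd).take (limit.toNat - lines.length) := by
  induction items with
  | nil => intro idx limit lines seen _; simp [citeLoopA, uniqPairs]
  | cons item rest ih =>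
    intro idx limit lines seen hlt
    simp only [citeLoopA, uniqPairs]
    by_cases hc : PySem.Set.contains seen (entryOf idx item).1
    · simp only [hc, if_true]
      exact ih (idx + 1) limit lines seen hlt
    · simp only [hc, if_false, Bool.false_eq_true]
      have hk : limit.toNat - lines.length = (limit.toNat - (lines.length + 1)) + 1 := by omega
      by_cases hstop : limit ≤ PySem.List.len (lines ++ [(entryOf idx item).2])
      · simp only [hstop, if_true]
        have h1 : limit.toNat - lines.length = 1 := by
          simp only [PySem.List.len_eq, List.length_append, List.length_singleton] at hstop
          push_cast at hstop
          omega
        simp [h1]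
      · simp only [hstop, if_false]
        have hlt' : ((lines ++ [(entryOf idx item).2]).length : Int) < limit := by
          simp only [PySem.List.len_eq, List.length_append, List.length_singleton] at hstop ⊢
          push_cast at hstop ⊢
          omega
        rw [ih (idx + 1) limit _ _ hlt']
        simp only [List.map_cons, hk, List.take_succ_cons, List.length_append,
          List.length_singleton, List.append_assoc, List.cons_append, List.nil_append]

-- uniqPairs over items = dedupP over the materialised entry list
theorem uniqPairs_eq_dedupP (items : List (List (String × List (String × String)))) :
    ∀ (idx : Int) (seen : PySem.Set String),
    uniqPairs items idx seen
      = dedupP ((PySem.List.enumerate items idx).map (fun p => entryOf p.1 p.2)) seen := by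
  induction items with
  | nil => intro idx seen; simp [uniqPairs, PySem.List.enumerate_nil, dedupP]
  | cons item rest ih =>
    intro idx seen
    rw [PySem.List.enumerate_cons]
    simp only [List.map_cons, uniqPairs, dedupP]
    by_cases hc : PySem.Set.contains seen (entryOf idx item).1
    · simp only [hc, if_true]; exact ih (idx + 1) seen
    · simp only [hc, if_false, Bool.false_eq_true]
      rw [ih (idx + 1) _]

-- B's positional first-occurrence filter computes dedupP (seen ↔ the names already passed).
theorem filter_eq_dedupP (names : List String) :
    ∀ (es : List (String × String)) (pre : List String) (seen : PySem.Set String),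
    names = pre ++ es.map Prod.fst →
    (∀ f, PySem.Set.contains seen f = decide (f ∈ pre)) →
    (((PySem.List.enumerate es (pre.length : Int)).filter
        (fun p => (PySem.List.index? names p.2.1).map (Int.ofNat) == some p.1)).map (fun p => p.2.2))
      = (dedupP es seen).map Prod.snd := by
  intro es
  induction es with
  | nil => intro pre seen _ _; simp [PySem.List.enumerate_nil, dedupP]
  | cons e rest ih =>
    intro pre seen hnames hseen
    rw [PySem.List.enumerate_cons]
    simp only [List.filter_cons, dedupP]
    have hmemiff : ∀ f, f ∈ (seen : List String) ↔ f ∈ pre := by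
      intro f
      have := hseen f
      rw [PySem.Set.contains_eq_decide] at this
      simpa using this
    by_cases hc : e.1 ∈ pre
    · -- seen before: index? finds an earlier position, the test fails; dedupP skips
      have hcontains : PySem.Set.contains seen e.1 = true := by rw [hseen]; simpa using hc
      have hidx : PySem.List.index? names e.1 = PySem.List.index? pre e.1 := by
        rw [hnames]; exact PySem.List.index?_append_of_mem _ hc
      obtain ⟨k, hk⟩ := Option.isSome_iff_exists.mp ((PySem.List.index?_isSome_iff pre e.1).mpr hc)
      obtain ⟨hklt, -, -⟩ := PySem.List.getElem_of_index?_eq_some hk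
      have hcond : ((PySem.List.index? names e.1).map (Int.ofNat) == some (pre.length : Int)) = false := by
        rw [hidx, hk]
        simp only [Option.map_some, beq_eq_false_iff_ne, ne_eq, Option.some.injEq]
        intro h
        have hke : k = pre.length := by simp only [Int.ofNat_eq_natCast] at h; exact_mod_cast h
        omega
      simp only [hcond, hcontains, if_true, Bool.false_eq_true, if_false]
      have hnames' : names = (pre ++ [e.1]) ++ rest.map Prod.fst := by
        rw [hnames]; simp
      have hseen' : ∀ f, PySem.Set.contains seen f = decide (f ∈ pre ++ [e.1]) := by
        intro f
        rw [hseen f]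
        by_cases hf : f = e.1
        · subst hf; simp [hc]
        · simp [hf]
      have := ih (pre ++ [e.1]) seen hnames' hseen'
      simpa [List.length_append] using this
    · -- fresh: index? finds exactly this position, the test passes; dedupP keeps
      have hcontains : PySem.Set.contains seen e.1 = false := by rw [hseen]; simpa using hc
      have hidx : PySem.List.index? names e.1 = some pre.length := by
        have h1 : names = (pre ++ [e.1]) ++ rest.map Prod.fst := by rw [hnames]; simp
        rw [h1, PySem.List.index?_append_of_mem _ (by simp),
          PySem.List.index?_append_singleton_self pre e.1 hc]
      have hcond : ((PySem.List.index? names e.1).map (Int.ofNat) == some (pre.length : Int)) = true := by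
        rw [hidx]; simp
      simp only [hcond, hcontains, if_true, Bool.false_eq_true, if_false, List.map_cons]
      have hnames' : names = (pre ++ [e.1]) ++ rest.map Prod.fst := by rw [hnames]; simp
      have hseen' : ∀ f, PySem.Set.contains (PySem.Set.add seen e.1) f = decide (f ∈ pre ++ [e.1]) := by
        intro f
        rw [PySem.Set.contains_eq_decide]
        by_cases hf : f = e.1
        · subst hf; simp [PySem.Set.mem_add]
        · simp only [PySem.Set.mem_add]
          simp [hf, hmemiff f]
      have := ih (pre ++ [e.1]) (PySem.Set.add seen e.1) hnames' hseen'
      simp only [List.length_append, List.length_singleton] at this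
      rw [show ((pre.length : Int) + 1) = ((pre.length + 1 : Nat) : Int) by push_cast; ring]
      rw [this]

-- the two line lists coincide for 0 ≤ limit
theorem lines_eq (evidence : List (List (String × List (String × String)))) (limit : Int)
    (h : 0 ≤ limit) :
    citeLoopA (PySem.List.slice evidence none (some (limit * 2))) 1 limit [] PySem.Set.empty
      = PySem.List.slice
          ((((PySem.List.enumerate
                ((PySem.List.enumerate (PySem.List.slice evidence none (some (limit * 2))) 1).map
                  (fun p => entryOf p.1 p.2)) 0).filter
              (fun p => (PySem.List.index?
                  (((PySem.List.enumerate (PySem.List.slice evidence none (some (limit * 2))) 1).map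
                      (fun p => entryOf p.1 p.2)).map (fun e => e.1)) p.2.1).map (Int.ofNat)
                == some p.1)).map (fun p => p.2.2)))
          none (some limit) := by
  have hfilter := filter_eq_dedupP
      (((PySem.List.enumerate (PySem.List.slice evidence none (some (limit * 2))) 1).map
          (fun p => entryOf p.1 p.2)).map (fun e => e.1))
      ((PySem.List.enumerate (PySem.List.slice evidence none (some (limit * 2))) 1).map
          (fun p => entryOf p.1 p.2))
      [] PySem.Set.empty (by simp) (by intro f; simp [PySem.Set.empty])
  rw [PySem.List.slice_to _ h]
  simp only [List.length_nil, Int.natCast_zero] at hfilter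
  rw [hfilter, ← uniqPairs_eq_dedupP]
  rcases eq_or_lt_of_le h with hz | hpos
  · have hsl : PySem.List.slice evidence none (some (limit * 2)) = [] := by
      rw [← hz]
      have h2 : (0 : Int) * 2 = 0 := by ring
      rw [h2, PySem.List.slice_to _ le_rfl]
      simp
    rw [hsl]
    simp [citeLoopA, uniqPairs]
  · rw [citeLoopA_eq _ 1 limit [] PySem.Set.empty (by simpa using hpos)]
    simp

-- negative 2*limit slices an empty prefix once the whole list is dropped
theorem slice_empty_of_neg (evidence : List (List (String × List (String × String)))) (limit : Int)
    (hneg : limit < 0) (hlen : (evidence.length : Int) ≤ -(2 * limit)) :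
    PySem.List.slice evidence none (some (limit * 2)) = [] := by
  have hk : limit * 2 = -(((-(2 * limit)).toNat : Nat) : Int) := by omega
  rw [hk, PySem.List.slice_to_neg_natCast evidence ((-(2 * limit)).toNat) (by omega)]
  have : evidence.length - ((-(2 * limit)).toNat : Nat) = 0 := by omega
  rw [this]
  simp

-- every slice of [] is []
theorem slice_nil_eq_nil (a b : Option Int) : PySem.List.slice ([] : List String) a b = [] := by
  cases a <;> cases b <;> simp [PySem.List.slice]

-- ===== VERDICT (by name: the statement is the Claim_ definition above) =====
theorem build_citation_section_py_spec : Claim_equal_build_citation_section_py := by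
  intro evidence limit _ hpre
  unfold Spec_build_citation_section_py
  unfold build_citation_section_py build_citation_section_py_alt
  by_cases h : 0 ≤ limit
  · rw [lines_eq evidence limit h]
  · have hneg : limit < 0 := by omega
    have hlen : (evidence.length : Int) ≤ -(2 * limit) := by
      rcases hpre with h0 | hl
      · omega
      · exact hl
    rw [slice_empty_of_neg evidence limit hneg hlen]
    simp [citeLoopA, PySem.List.enumerate_nil, slice_nil_eq_nil]
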